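-- pv_equiv track=rewrite | github.com/iculus/SAGE | SAGERobot/SAGE/defsearch/defsSearches.py | getVarsOfInteret
-- ===== SOURCE A (Python) =====
-- def getVarsOfInteret(whichSearchTerms, theData):
--     #generate empty list of lists equivalent to number of definitions for exper type
--     elist = []
--     for index in whichSearchTerms:
--         eset = []
--         elist.append(eset)
--
--     #cycle through every block and trial and find the search terms, then return a list of lists of values
--     block = 0
--     while block < len(theData):
--         for index, searchTerm in enumerate(whichSearchTerms):   #iterate through each serchTerm for this experiment
--             #block set is universe
--             lookTracker = []
--
--             trial = 0
--             #maybe add a function here to accept trial requests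
--             while trial < len(theData[block]):
--                 #trial set is universe
--                 trialDict = {}  #dictionary for one loop through one trial should be created or replaced over the next few lines
--                 for trialDat in theData[block][trial]:
--                     if trialDat.find(':') > -1:   #when the : is found in the string(line of brain file) that for whatever reason is element 1 of the
--                         a,b=trialDat.replace('\t\t', '').split(':') # make two strings split at the :
--                         #print a, '::', b    #temporary print two strings separated by funky character
--
--                         trialDict[a] = b    #set value for key
--
--                 title = searchTerm[0]; term3 = searchTerm[1]; term4 = searchTerm[2]; term5 = searchTerm[3]
--                 found = False
--                 for k in trialDict.keys():
--                     if k.find(term3) > -1 and k.find(term4) == -1 and k.find(term5) == -1: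
--                         lookTracker.append( trialDict[k].strip(' ') ); found = True
--                 if found == False: lookTracker.append('null')
--                 trial += 1
--             #print block, searchTerm[0], lookTracker
--             elist[index] += lookTracker
--         block += 1
--     return elist
-- ===== SOURCE B (Python) =====
-- def _parseTrial(trial):
--     # build the key:value dict of one trial once
--     d = {}
--     for line in trial:
--         if ':' in line:
--             key, val = line.replace('\t\t', '').split(':')
--             d[key] = val
--     return d
--
--
-- def getVarsOfInteret(whichSearchTerms, theData):
--     # Parse every trial's dict once, up front, instead of once per (block, search term).
--     parsed = [[_parseTrial(trial) for trial in block] for block in theData]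
--     out = []
--     for searchTerm in whichSearchTerms:
--         term3, term4, term5 = searchTerm[1], searchTerm[2], searchTerm[3]
--         row = []
--         for block in parsed:
--             for d in block:
--                 vals = [d[k].strip(' ') for k in d
--                         if term3 in k and term4 not in k and term5 not in k]
--                 row.extend(vals if vals else ['null'])
--         out.append(row)
--     return out
-- ===== Notes on version B (the rewrite author's own statement) =====
-- stated objective: faster
-- what changed: B parses each trial's key:value dict exactly once up front and then answers every search term from the parsed dicts with one comprehension per term, instead of A's re-parsing every trial once per (block, search term) inside nested while loops with an indexed accumulator list.
-- outside the precondition, e.g. on getVarsOfInteret([['x']], []): A returns [[]], B raises IndexError; on getVarsOfInteret([], [[['a:b:c']]]): A returns [], B raises ValueError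
import Mathlib
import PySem

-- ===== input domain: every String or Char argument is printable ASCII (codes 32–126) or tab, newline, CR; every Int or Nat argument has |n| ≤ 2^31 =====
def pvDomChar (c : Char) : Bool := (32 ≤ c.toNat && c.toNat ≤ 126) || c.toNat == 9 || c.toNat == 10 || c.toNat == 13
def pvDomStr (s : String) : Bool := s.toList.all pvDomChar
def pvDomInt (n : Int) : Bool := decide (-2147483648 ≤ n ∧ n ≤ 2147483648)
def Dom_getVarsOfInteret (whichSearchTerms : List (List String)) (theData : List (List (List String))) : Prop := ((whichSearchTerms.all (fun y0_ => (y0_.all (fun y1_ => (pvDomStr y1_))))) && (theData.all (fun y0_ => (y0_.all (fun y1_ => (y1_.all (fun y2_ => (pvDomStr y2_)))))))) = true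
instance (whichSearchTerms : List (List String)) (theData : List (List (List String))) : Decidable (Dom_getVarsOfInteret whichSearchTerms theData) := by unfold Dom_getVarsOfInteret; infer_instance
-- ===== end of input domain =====

-- B parses every trial's key:value dict once up front and answers each search term from the
-- parsed dicts (objective: faster — A re-parses every trial once per block per search term).

-- ===== PORT A =====
-- the inner `for trialDat in theData[block][trial]` dict-building loop body
-- (the `| _ => d` arm is where Python's 2-way unpack raises ValueError; excluded by Pre_)
def aParseLine (d : PySem.Dict String String) (line : String) : PySem.Dict String String :=
  if PySem.Str.find line ":" > -1 then
    match PySem.Str.split? (PySem.Str.replace line "\t\t" "") ":" with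
    | some [a, b] => d.insert a b
    | _ => d
  else d

-- `trialDict = {}` then the line loop
def aTrialDict (trial : List String) : PySem.Dict String String :=
  trial.foldl aParseLine PySem.Dict.empty

-- the `while trial < len(theData[block])` loop, carrying lookTracker
def aTrialLoop (trials : List (List String)) (searchTerm : List String)
    (lookTracker : List String) : List String :=
  match trials with
  | [] => lookTracker
  | trial :: rest =>
    let trialDict := aTrialDict trial
    let term3 := PySem.List.pyGetD searchTerm 1 ""   -- searchTerm[1..3]; in range under Pre_
    let term4 := PySem.List.pyGetD searchTerm 2 ""
    let term5 := PySem.List.pyGetD searchTerm 3 ""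
    let st := trialDict.keys.foldl (fun (st : List String × Bool) k =>
        if PySem.Str.find k term3 > -1 ∧ PySem.Str.find k term4 = -1 ∧ PySem.Str.find k term5 = -1 then
          (st.1 ++ [PySem.Str.stripChars (trialDict.getD k "") " "], true)
        else st) (lookTracker, false)
    aTrialLoop rest searchTerm (if st.2 = false then st.1 ++ ["null"] else st.1)

-- the `for index, searchTerm in enumerate(whichSearchTerms)` loop: elist[index] += lookTracker
def aTermLoop (terms : List (List String)) (idx : Nat) (trials : List (List String))
    (elist : List (List String)) : List (List String) :=
  match terms with
  | [] => elist
  | t :: rest =>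
      aTermLoop rest (idx + 1) trials (elist.set idx (elist.getD idx [] ++ aTrialLoop trials t []))

def getVarsOfInteret (whichSearchTerms : List (List String)) (theData : List (List (List String))) : List (List String) :=
  let elist := whichSearchTerms.foldl (fun e _ => e ++ [[]]) []
  theData.foldl (fun e block => aTermLoop whichSearchTerms 0 block e) elist

-- ===== PORT B =====
-- _parseTrial
def bParseTrial (trial : List String) : PySem.Dict String String :=
  trial.foldl (fun d line =>
    if PySem.Str.isIn ":" line then
      match PySem.Str.split? (PySem.Str.replace line "\t\t" "") ":" with
      | some [key, val] => d.insert key val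
      | _ => d
    else d) PySem.Dict.empty

-- the `vals = [...]` comprehension for one parsed trial dict
def bVals (d : PySem.Dict String String) (t3 t4 t5 : String) : List String :=
  (d.keys.filter (fun k =>
      PySem.Str.isIn t3 k && !PySem.Str.isIn t4 k && !PySem.Str.isIn t5 k)).map
    (fun k => PySem.Str.stripChars (d.getD k "") " ")

def getVarsOfInteret_alt (whichSearchTerms : List (List String)) (theData : List (List (List String))) : List (List String) :=
  let parsed := theData.map (fun block => block.map bParseTrial)
  whichSearchTerms.map (fun searchTerm =>
    let term3 := PySem.List.pyGetD searchTerm 1 ""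
    let term4 := PySem.List.pyGetD searchTerm 2 ""
    let term5 := PySem.List.pyGetD searchTerm 3 ""
    parsed.flatMap (fun block => block.flatMap (fun d =>
      let vals := bVals d term3 term4 term5
      if vals = [] then ["null"] else vals)))

-- ===== PRECONDITION & SPEC =====
-- Pre_ excludes exactly the raising inputs: a search term with fewer than 4 entries makes
-- A raise IndexError at searchTerm[3] (B likewise, and also when theData has no trial, where
-- A happens to return before indexing), and a line with two or more ':' makes the 2-way
-- unpack of split(':') raise ValueError in both (in A only once some search term exists).
def Pre_getVarsOfInteret (whichSearchTerms : List (List String)) (theData : List (List (List String))) : Prop :=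
  (∀ t ∈ whichSearchTerms, 4 ≤ t.length) ∧
  (∀ block ∈ theData, ∀ trial ∈ block, ∀ line ∈ trial, PySem.Str.count line ":" ≤ 1)
instance (whichSearchTerms : List (List String)) (theData : List (List (List String))) : Decidable (Pre_getVarsOfInteret whichSearchTerms theData) := by unfold Pre_getVarsOfInteret; infer_instance

def pvWitness_getVarsOfInteret : List (List String) × List (List (List String)) :=
  ([["title", "a", "b", "c"]], [[["key a: 1", "other"], ["zz"]], [["b x:2"]]])

def Spec_getVarsOfInteret (whichSearchTerms : List (List String)) (theData : List (List (List String))) (out : List (List String)) : Prop := out = getVarsOfInteret_alt whichSearchTerms theData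
instance (whichSearchTerms : List (List String)) (theData : List (List (List String))) (out : List (List String)) : Decidable (Spec_getVarsOfInteret whichSearchTerms theData out) := by unfold Spec_getVarsOfInteret; infer_instance

-- ===== CLAIM (what is proved, stated in full; the proofs are below) =====
def Claim_equal_getVarsOfInteret : Prop := ∀ (whichSearchTerms : List (List String)) (theData : List (List (List String))), Dom_getVarsOfInteret whichSearchTerms theData → Pre_getVarsOfInteret whichSearchTerms theData → Spec_getVarsOfInteret whichSearchTerms theData (getVarsOfInteret whichSearchTerms theData)

-- ===== LEMMAS AND PROOFS =====

-- B's parse step as a named function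
def bStep (d : PySem.Dict String String) (line : String) : PySem.Dict String String :=
  if PySem.Str.isIn ":" line then
    match PySem.Str.split? (PySem.Str.replace line "\t\t" "") ":" with
    | some [key, val] => d.insert key val
    | _ => d
  else d

theorem bParseTrial_eq (trial : List String) : bParseTrial trial = trial.foldl bStep PySem.Dict.empty := rfl

theorem find_gt_iff (s sub : String) : PySem.Str.find s sub > -1 ↔ PySem.Str.isIn sub s = true := by
  rw [PySem.Str.isIn_iff_infix, ← PySem.Str.find_nonneg_iff]
  omega

theorem aParseLine_eq_bStep : aParseLine = bStep := by
  funext d line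
  unfold aParseLine bStep
  by_cases h : PySem.Str.isIn ":" line = true
  · rw [if_pos ((find_gt_iff _ _).mpr h), if_pos h]
  · rw [if_neg (fun hf => h ((find_gt_iff _ _).mp hf)), if_neg h]

theorem aTrialDict_eq (trial : List String) : aTrialDict trial = bParseTrial trial := by
  rw [aTrialDict, bParseTrial_eq, aParseLine_eq_bStep]

-- scan loop shape
theorem scan_foldl (keys : List String) (p : String → Prop) [DecidablePred p] (g : String → String)
    (acc : List String) (f : Bool) :
    keys.foldl (fun (st : List String × Bool) k =>
        if p k then (st.1 ++ [g k], true) else st) (acc, f)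
      = (acc ++ (keys.filter (fun k => decide (p k))).map g, f || !(keys.filter (fun k => decide (p k))).isEmpty) := by
  induction keys generalizing acc f with
  | nil => simp
  | cons k rest ih =>
    by_cases h : p k
    · simp [h, ih]
    · simp [h, ih]
theorem pred_eq (t3 t4 t5 : String) :
    (fun k => decide (PySem.Str.find k t3 > -1 ∧ PySem.Str.find k t4 = -1 ∧ PySem.Str.find k t5 = -1))
      = (fun k => PySem.Str.isIn t3 k && !PySem.Str.isIn t4 k && !PySem.Str.isIn t5 k) := by
  funext k
  have e3 : decide (PySem.Str.find k t3 > -1) = PySem.Str.isIn t3 k := by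
    cases hb : PySem.Str.isIn t3 k
    · exact decide_eq_false (fun hf => by rw [(find_gt_iff k t3).mp hf] at hb; cases hb)
    · exact decide_eq_true ((find_gt_iff k t3).mpr hb)
  have e4 : decide (PySem.Str.find k t4 = -1) = !PySem.Str.isIn t4 k := by
    cases hb : PySem.Str.isIn t4 k
    · exact decide_eq_true (by rw [PySem.Str.find_eq_neg_one_iff, ← PySem.Str.isIn_iff_infix, hb]; simp)
    · refine decide_eq_false (fun hf => ?_)
      rw [PySem.Str.find_eq_neg_one_iff, ← PySem.Str.isIn_iff_infix] at hf
      exact hf hb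
  have e5 : decide (PySem.Str.find k t5 = -1) = !PySem.Str.isIn t5 k := by
    cases hb : PySem.Str.isIn t5 k
    · exact decide_eq_true (by rw [PySem.Str.find_eq_neg_one_iff, ← PySem.Str.isIn_iff_infix, hb]; simp)
    · refine decide_eq_false (fun hf => ?_)
      rw [PySem.Str.find_eq_neg_one_iff, ← PySem.Str.isIn_iff_infix] at hf
      exact hf hb
  rw [Bool.decide_and, Bool.decide_and, e3, e4, e5, Bool.and_assoc]
-- one trial's contribution, shared shape
def contrib (t3 t4 t5 : String) (trial : List String) : List String :=
  let vals := bVals (bParseTrial trial) t3 t4 t5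
  if vals = [] then ["null"] else vals

theorem aTrialLoop_eq (trials : List (List String)) (t : List String) (acc : List String) :
    aTrialLoop trials t acc
      = acc ++ trials.flatMap (contrib (PySem.List.pyGetD t 1 "") (PySem.List.pyGetD t 2 "") (PySem.List.pyGetD t 3 "")) := by
  induction trials generalizing acc with
  | nil => simp [aTrialLoop]
  | cons trial rest ih =>
    rw [aTrialLoop]
    rw [scan_foldl, ih, aTrialDict_eq, pred_eq]
    simp only [List.flatMap_cons, contrib, bVals, Bool.false_or, ← List.append_assoc]
    set L := List.filter (fun k => PySem.Str.isIn (PySem.List.pyGetD t 1 "") k && !PySem.Str.isIn (PySem.List.pyGetD t 2 "") k && !PySem.Str.isIn (PySem.List.pyGetD t 3 "") k) (bParseTrial trial).keys with hL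
    by_cases h : L = []
    · rw [h]; simp
    · rw [if_neg (by simp [List.isEmpty_iff, h]), if_neg (by simp [List.map_eq_nil_iff, h])]
theorem aTermLoop_map (trials : List (List String)) :
    ∀ (rest : List (List String)) (pre : List (List String)) (h : List String → List String),
    aTermLoop rest pre.length trials (pre ++ rest.map h)
      = pre ++ rest.map (fun t => h t ++ aTrialLoop trials t []) := by
  intro rest
  induction rest with
  | nil => intro pre h; simp [aTermLoop]
  | cons t rest' ih =>
    intro pre h
    rw [aTermLoop]
    have hget : (pre ++ h t :: rest'.map h).getD pre.length [] = h t := by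
      simp [List.getD]
    have hset : (pre ++ h t :: rest'.map h).set pre.length (h t ++ aTrialLoop trials t [])
        = (pre ++ [h t ++ aTrialLoop trials t []]) ++ rest'.map h := by
      rw [List.set_append]
      simp
    rw [List.map_cons, hget, hset]
    have hlen : pre.length + 1 = (pre ++ [h t ++ aTrialLoop trials t []]).length := by simp
    rw [hlen, ih]
    simp

theorem blockFold (terms : List (List String)) :
    ∀ (blocks : List (List (List String))) (h : List String → List String),
    blocks.foldl (fun e b => aTermLoop terms 0 b e) (terms.map h)
      = terms.map (fun t => h t ++ blocks.flatMap (fun b => aTrialLoop b t [])) := by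
  intro blocks
  induction blocks with
  | nil => intro h; simp
  | cons b rest ih =>
    intro h
    rw [List.foldl_cons]
    have h0 : aTermLoop terms 0 b (terms.map h) = terms.map (fun t => h t ++ aTrialLoop b t []) := by
      have := aTermLoop_map b terms [] h
      simpa using this
    rw [h0, ih]
    simp [List.append_assoc]

theorem main_eq (terms : List (List String)) (data : List (List (List String))) :
    getVarsOfInteret terms data = getVarsOfInteret_alt terms data := by
  simp only [getVarsOfInteret, getVarsOfInteret_alt]
  rw [PySem.List.foldl_append_singleton_eq_map (f := fun _ => ([] : List String)), List.nil_append, blockFold]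
  apply List.map_congr_left
  intro t _
  simp only [aTrialLoop_eq, List.nil_append, List.flatMap_map]
  rfl

-- ===== VERDICT (by name: the statement is the Claim_ definition above) =====
theorem getVarsOfInteret_spec : Claim_equal_getVarsOfInteret := by
  intro whichSearchTerms theData _ _
  exact main_eq whichSearchTerms theData
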